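-- pv_equiv track=rewrite | github.com/tec-csf/TC3059-PF-Otono-2019-cesar | api/models/mongo.py | dividir_paginador
-- ===== SOURCE A (Python) =====
-- def dividir_paginador(data):
--     paginadorAF = []
--     paginadorGL = []
--     paginadorMQ = []
--     paginadorRV = []
--     paginadorWZ = []
--     paginadorRespuesta = []
--
--     for d in data:
--         if d['name'].startswith(('A', 'B', 'C', 'D', 'E', 'F')):
--             paginadorAF.append(d)
--         elif d['name'].startswith(('G', 'H', 'I', 'J', 'K', 'L')):
--             paginadorGL.append(d)
--         elif d['name'].startswith(('M', 'N', 'O', 'P', 'Q')):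
--             paginadorMQ.append(d)
--         elif d['name'].startswith(('R', 'S', 'T', 'U', 'V')):
--             paginadorRV.append(d)
--         elif d['name'].startswith(('W', 'X', 'Y', 'Z')):
--             paginadorWZ.append(d)
--
--     paginadorAF = sorted(paginadorAF, key=lambda k: k['name'])
--     paginadorGL = sorted(paginadorGL, key=lambda k: k['name'])
--     paginadorMQ = sorted(paginadorMQ, key=lambda k: k['name'])
--     paginadorRV = sorted(paginadorRV, key=lambda k: k['name'])
--     paginadorWZ = sorted(paginadorWZ, key=lambda k: k['name'])
--     data = sorted(data, key=lambda k: k['name'])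
--
--     paginadorRespuesta.append(paginadorAF)
--     paginadorRespuesta.append(paginadorGL)
--     paginadorRespuesta.append(paginadorMQ)
--     paginadorRespuesta.append(paginadorRV)
--     paginadorRespuesta.append(paginadorWZ)
--     paginadorRespuesta.append(data)
--
--     return paginadorRespuesta
-- ===== SOURCE B (Python) =====
-- def dividir_paginador(data):
--     data = sorted(data, key=lambda k: k['name'])
--     groups = ["ABCDEF", "GHIJKL", "MNOPQ", "RSTUV", "WXYZ"]
--     buckets = [[], [], [], [], []]
--     for d in data:
--         n = d['name']
--         for i, letters in enumerate(groups):
--             if n and n[0] in letters: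
--                 buckets[i].append(d)
--                 break
--     buckets.append(data)
--     return buckets
-- ===== Notes on version B (the rewrite author's own statement) =====
-- stated objective: alternative
-- what changed: B sorts the whole list once up front and distributes items into the five buckets in a single table-driven pass (first-character membership in a letter-group list with break), relying on stability of the global sort, instead of A's elif chain of startswith tuples followed by five separate per-bucket sorts plus the global sort.
import Mathlib
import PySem

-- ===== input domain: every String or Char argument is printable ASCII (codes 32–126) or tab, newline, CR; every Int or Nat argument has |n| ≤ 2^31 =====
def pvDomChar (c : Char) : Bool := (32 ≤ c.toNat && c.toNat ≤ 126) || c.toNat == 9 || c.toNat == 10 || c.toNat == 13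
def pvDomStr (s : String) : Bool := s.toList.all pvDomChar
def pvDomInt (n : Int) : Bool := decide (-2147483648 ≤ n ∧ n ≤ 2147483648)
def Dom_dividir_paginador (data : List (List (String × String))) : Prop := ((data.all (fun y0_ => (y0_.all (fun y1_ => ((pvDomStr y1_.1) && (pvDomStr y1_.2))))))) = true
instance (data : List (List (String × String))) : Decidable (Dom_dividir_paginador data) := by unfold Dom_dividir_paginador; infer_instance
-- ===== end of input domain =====

-- B sorts the whole list once and distributes it in one table-driven pass (stable sort ⇒ buckets come out
-- sorted), replacing A's elif-chain partition followed by five per-bucket sorts plus the global sort.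

-- ===== PORT A =====
-- d['name']  (Pre_ guarantees the key is present, so the default is never read inside Pre_)
def pvName (d : List (String × String)) : String := PySem.Dict.getD (PySem.Dict.mk d) "name" ""
-- d['name'].startswith(('A','B','C','D','E','F'))  — a tuple argument is an OR of the prefixes
def pvAF (n : String) : Bool :=
  PySem.Str.startswith n "A" || PySem.Str.startswith n "B" || PySem.Str.startswith n "C" ||
  PySem.Str.startswith n "D" || PySem.Str.startswith n "E" || PySem.Str.startswith n "F"
def pvGL (n : String) : Bool :=
  PySem.Str.startswith n "G" || PySem.Str.startswith n "H" || PySem.Str.startswith n "I" ||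
  PySem.Str.startswith n "J" || PySem.Str.startswith n "K" || PySem.Str.startswith n "L"
def pvMQ (n : String) : Bool :=
  PySem.Str.startswith n "M" || PySem.Str.startswith n "N" || PySem.Str.startswith n "O" ||
  PySem.Str.startswith n "P" || PySem.Str.startswith n "Q"
def pvRV (n : String) : Bool :=
  PySem.Str.startswith n "R" || PySem.Str.startswith n "S" || PySem.Str.startswith n "T" ||
  PySem.Str.startswith n "U" || PySem.Str.startswith n "V"
def pvWZ (n : String) : Bool :=
  PySem.Str.startswith n "W" || PySem.Str.startswith n "X" || PySem.Str.startswith n "Y" ||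
  PySem.Str.startswith n "Z"

def dividir_paginador (data : List (List (String × String))) : List (List (List (String × String))) :=
  -- the for-loop over data with the five elif branches, state = the five bucket lists
  let r := data.foldl (fun (s : List (List (String × String)) × List (List (String × String)) ×
      List (List (String × String)) × List (List (String × String)) × List (List (String × String))) d =>
    if pvAF (pvName d) then (s.1 ++ [d], s.2.1, s.2.2.1, s.2.2.2.1, s.2.2.2.2)
    else if pvGL (pvName d) then (s.1, s.2.1 ++ [d], s.2.2.1, s.2.2.2.1, s.2.2.2.2)
    else if pvMQ (pvName d) then (s.1, s.2.1, s.2.2.1 ++ [d], s.2.2.2.1, s.2.2.2.2)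
    else if pvRV (pvName d) then (s.1, s.2.1, s.2.2.1, s.2.2.2.1 ++ [d], s.2.2.2.2)
    else if pvWZ (pvName d) then (s.1, s.2.1, s.2.2.1, s.2.2.2.1, s.2.2.2.2 ++ [d])
    else s) ([], [], [], [], [])
  -- the five per-bucket sorts, the global sort, and the six appends
  [PySem.List.sorted r.1 pvName false, PySem.List.sorted r.2.1 pvName false,
   PySem.List.sorted r.2.2.1 pvName false, PySem.List.sorted r.2.2.2.1 pvName false,
   PySem.List.sorted r.2.2.2.2 pvName false, PySem.List.sorted data pvName false]

-- ===== PORT B =====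
def pvGroups : List String := ["ABCDEF", "GHIJKL", "MNOPQ", "RSTUV", "WXYZ"]
-- Python 'n and n[0] in letters': string truthiness = nonemptiness; 'in' on a 1-char string is the
-- substring test PySem.Chars.isIn (exact)
def pvHit (n : String) (letters : String) : Bool :=
  match n.toList with
  | [] => false
  | c :: _ => PySem.Chars.isIn [c] letters.toList
-- 'for i, letters in enumerate(groups): if n and n[0] in letters: …; break'
def pvGroupIdx (n : String) : List (Int × String) → Option Int
  | [] => none
  | (i, letters) :: rest => if pvHit n letters then some i else pvGroupIdx n rest

def dividir_paginador_alt (data : List (List (String × String))) : List (List (List (String × String))) :=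
  let sdata := PySem.List.sorted data pvName false
  -- buckets[i].append(d); i from enumerate is 0..4 so .toNat is exact
  let buckets := sdata.foldl (fun (bs : List (List (List (String × String)))) d =>
      match pvGroupIdx (pvName d) (PySem.List.enumerate pvGroups) with
      | some i => bs.set i.toNat (bs.getD i.toNat [] ++ [d])
      | none => bs)
    [[], [], [], [], []]
  buckets ++ [sdata]

-- ===== PRECONDITION & SPEC =====
-- Pre_ excludes exactly the dicts without a 'name' key, on which Python A raises KeyError.
def Pre_dividir_paginador (data : List (List (String × String))) : Prop :=
  ∀ d ∈ data, (PySem.Dict.get? (PySem.Dict.mk d) "name").isSome = true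
instance (data : List (List (String × String))) : Decidable (Pre_dividir_paginador data) := by
  unfold Pre_dividir_paginador; infer_instance
def pvWitness_dividir_paginador : (List (List (String × String))) :=
  [[("name", "Bruno")], [("name", "ana")], [("name", "Zoe")], [("name", "Bruno")]]

def Spec_dividir_paginador (data : List (List (String × String))) (out : List (List (List (String × String)))) : Prop := out = dividir_paginador_alt data
instance (data : List (List (String × String))) (out : List (List (List (String × String)))) : Decidable (Spec_dividir_paginador data out) := by unfold Spec_dividir_paginador; infer_instance

-- ===== CLAIM (what is proved, stated in full; the proofs are below) =====
def Claim_equal_dividir_paginador : Prop := ∀ (data : List (List (String × String))), Dom_dividir_paginador data → Pre_dividir_paginador data → Spec_dividir_paginador data (dividir_paginador data)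

-- ===== LEMMAS AND PROOFS =====

-- the elif chain of A, as one filter predicate per bucket
def pvP (i : Nat) (d : List (String × String)) : Bool :=
  match i with
  | 0 => pvAF (pvName d)
  | 1 => !pvAF (pvName d) && pvGL (pvName d)
  | 2 => !pvAF (pvName d) && !pvGL (pvName d) && pvMQ (pvName d)
  | 3 => !pvAF (pvName d) && !pvGL (pvName d) && !pvMQ (pvName d) && pvRV (pvName d)
  | 4 => !pvAF (pvName d) && !pvGL (pvName d) && !pvMQ (pvName d) && !pvRV (pvName d) && pvWZ (pvName d)
  | _ + 5 => false

-- the group-table lookup of B, as one filter predicate per bucket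
def pvQ (i : Nat) (d : List (String × String)) : Bool :=
  decide (pvGroupIdx (pvName d) (PySem.List.enumerate pvGroups) = some (i : Int))

lemma singleton_infix_iff_mem (c : Char) (l : List Char) : ([c] <:+: l) ↔ c ∈ l := by
  constructor
  · rintro ⟨s, t, h⟩; subst h; simp
  · intro h; obtain ⟨s, t, h⟩ := List.append_of_mem h; subst h; exact ⟨s, t, by simp⟩

lemma chars_isIn_single (c : Char) (s : List Char) : PySem.Chars.isIn [c] s = s.contains c := by
  rw [Bool.eq_iff_iff, PySem.Chars.isIn_iff_infix, singleton_infix_iff_mem]; simp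

lemma hit_AF (n : String) : pvAF n = pvHit n "ABCDEF" := by
  cases h : n.toList with
  | nil => simp [pvAF, pvHit, h, PySem.Str.startswith, PySem.Chars.startswith]
  | cons c r =>
    simp only [pvAF, pvHit, h, chars_isIn_single, PySem.Str.startswith, PySem.Chars.startswith]
    rw [Bool.eq_iff_iff]; simp [List.isPrefixOf]; tauto

lemma hit_GL (n : String) : pvGL n = pvHit n "GHIJKL" := by
  cases h : n.toList with
  | nil => simp [pvGL, pvHit, h, PySem.Str.startswith, PySem.Chars.startswith]
  | cons c r =>
    simp only [pvGL, pvHit, h, chars_isIn_single, PySem.Str.startswith, PySem.Chars.startswith]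
    rw [Bool.eq_iff_iff]; simp [List.isPrefixOf]; tauto

lemma hit_MQ (n : String) : pvMQ n = pvHit n "MNOPQ" := by
  cases h : n.toList with
  | nil => simp [pvMQ, pvHit, h, PySem.Str.startswith, PySem.Chars.startswith]
  | cons c r =>
    simp only [pvMQ, pvHit, h, chars_isIn_single, PySem.Str.startswith, PySem.Chars.startswith]
    rw [Bool.eq_iff_iff]; simp [List.isPrefixOf]; tauto

lemma hit_RV (n : String) : pvRV n = pvHit n "RSTUV" := by
  cases h : n.toList with
  | nil => simp [pvRV, pvHit, h, PySem.Str.startswith, PySem.Chars.startswith]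
  | cons c r =>
    simp only [pvRV, pvHit, h, chars_isIn_single, PySem.Str.startswith, PySem.Chars.startswith]
    rw [Bool.eq_iff_iff]; simp [List.isPrefixOf]; tauto

lemma hit_WZ (n : String) : pvWZ n = pvHit n "WXYZ" := by
  cases h : n.toList with
  | nil => simp [pvWZ, pvHit, h, PySem.Str.startswith, PySem.Chars.startswith]
  | cons c r =>
    simp only [pvWZ, pvHit, h, chars_isIn_single, PySem.Str.startswith, PySem.Chars.startswith]
    rw [Bool.eq_iff_iff]; simp [List.isPrefixOf]; tauto

lemma groupIdx_eq (n : String) : pvGroupIdx n (PySem.List.enumerate pvGroups) =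
    if pvHit n "ABCDEF" then some 0 else if pvHit n "GHIJKL" then some 1
    else if pvHit n "MNOPQ" then some 2 else if pvHit n "RSTUV" then some 3
    else if pvHit n "WXYZ" then some 4 else none := by
  show pvGroupIdx n [(0, "ABCDEF"), (1, "GHIJKL"), (2, "MNOPQ"), (3, "RSTUV"), (4, "WXYZ")] = _
  simp only [pvGroupIdx]

lemma Q_eq_P (i : Nat) (d : List (String × String)) : pvQ i d = pvP i d := by
  have h5 : ∀ j : Nat, 5 ≤ j → pvP j d = false := by
    intro j hj; obtain ⟨k, rfl⟩ := Nat.exists_eq_add_of_le hj; simp [pvP, Nat.add_comm]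
  simp only [pvQ, groupIdx_eq, ← hit_AF, ← hit_GL, ← hit_MQ, ← hit_RV, ← hit_WZ]
  by_cases h0 : pvAF (pvName d) <;> by_cases h1 : pvGL (pvName d) <;>
    by_cases h2 : pvMQ (pvName d) <;> by_cases h3 : pvRV (pvName d) <;>
    by_cases h4 : pvWZ (pvName d) <;>
  · match i with
    | 0 => simp [pvP, h0, h1, h2, h3, h4]
    | 1 => simp [pvP, h0, h1, h2, h3, h4]
    | 2 => simp [pvP, h0, h1, h2, h3, h4]
    | 3 => simp [pvP, h0, h1, h2, h3, h4]
    | 4 => simp [pvP, h0, h1, h2, h3, h4]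
    | j + 5 => simp [h5 (j + 5) (by omega), h0, h1, h2, h3, h4] <;> omega

lemma aFold (l : List (List (String × String)))
    (s0 s1 s2 s3 s4 : List (List (String × String))) :
    l.foldl (fun (s : List (List (String × String)) × List (List (String × String)) ×
      List (List (String × String)) × List (List (String × String)) × List (List (String × String))) d =>
      if pvAF (pvName d) then (s.1 ++ [d], s.2.1, s.2.2.1, s.2.2.2.1, s.2.2.2.2)
      else if pvGL (pvName d) then (s.1, s.2.1 ++ [d], s.2.2.1, s.2.2.2.1, s.2.2.2.2)
      else if pvMQ (pvName d) then (s.1, s.2.1, s.2.2.1 ++ [d], s.2.2.2.1, s.2.2.2.2)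
      else if pvRV (pvName d) then (s.1, s.2.1, s.2.2.1, s.2.2.2.1 ++ [d], s.2.2.2.2)
      else if pvWZ (pvName d) then (s.1, s.2.1, s.2.2.1, s.2.2.2.1, s.2.2.2.2 ++ [d])
      else s) (s0, s1, s2, s3, s4) =
    (s0 ++ l.filter (pvP 0), s1 ++ l.filter (pvP 1), s2 ++ l.filter (pvP 2),
     s3 ++ l.filter (pvP 3), s4 ++ l.filter (pvP 4)) := by
  induction l generalizing s0 s1 s2 s3 s4 with
  | nil => simp
  | cons d t ih =>
    simp only [List.foldl_cons]
    by_cases h0 : pvAF (pvName d) <;> by_cases h1 : pvGL (pvName d) <;>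
      by_cases h2 : pvMQ (pvName d) <;> by_cases h3 : pvRV (pvName d) <;>
      by_cases h4 : pvWZ (pvName d) <;>
      simp [h0, h1, h2, h3, h4, ih, pvP]

lemma bFold (l : List (List (String × String)))
    (b0 b1 b2 b3 b4 : List (List (String × String))) :
    l.foldl (fun (bs : List (List (List (String × String)))) d =>
      match pvGroupIdx (pvName d) (PySem.List.enumerate pvGroups) with
      | some i => bs.set i.toNat (bs.getD i.toNat [] ++ [d])
      | none => bs) [b0, b1, b2, b3, b4] =
    [b0 ++ l.filter (pvQ 0), b1 ++ l.filter (pvQ 1), b2 ++ l.filter (pvQ 2),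
     b3 ++ l.filter (pvQ 3), b4 ++ l.filter (pvQ 4)] := by
  induction l generalizing b0 b1 b2 b3 b4 with
  | nil => simp
  | cons d t ih =>
    rw [List.foldl_cons]
    have hgi := groupIdx_eq (pvName d)
    split_ifs at hgi with h0 h1 h2 h3 h4
    · rw [show (match pvGroupIdx (pvName d) (PySem.List.enumerate pvGroups) with
          | some i => [b0, b1, b2, b3, b4].set i.toNat ([b0, b1, b2, b3, b4].getD i.toNat [] ++ [d])
          | none => [b0, b1, b2, b3, b4]) = [b0 ++ [d], b1, b2, b3, b4] from by simp [hgi]]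
      rw [ih]
      simp [pvQ, hgi]
    · rw [show (match pvGroupIdx (pvName d) (PySem.List.enumerate pvGroups) with
          | some i => [b0, b1, b2, b3, b4].set i.toNat ([b0, b1, b2, b3, b4].getD i.toNat [] ++ [d])
          | none => [b0, b1, b2, b3, b4]) = [b0, b1 ++ [d], b2, b3, b4] from by simp [hgi]]
      rw [ih]
      simp [pvQ, hgi]
    · rw [show (match pvGroupIdx (pvName d) (PySem.List.enumerate pvGroups) with
          | some i => [b0, b1, b2, b3, b4].set i.toNat ([b0, b1, b2, b3, b4].getD i.toNat [] ++ [d])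
          | none => [b0, b1, b2, b3, b4]) = [b0, b1, b2 ++ [d], b3, b4] from by simp [hgi]]
      rw [ih]
      simp [pvQ, hgi]
    · rw [show (match pvGroupIdx (pvName d) (PySem.List.enumerate pvGroups) with
          | some i => [b0, b1, b2, b3, b4].set i.toNat ([b0, b1, b2, b3, b4].getD i.toNat [] ++ [d])
          | none => [b0, b1, b2, b3, b4]) = [b0, b1, b2, b3 ++ [d], b4] from by simp [hgi]]
      rw [ih]
      simp [pvQ, hgi]
    · rw [show (match pvGroupIdx (pvName d) (PySem.List.enumerate pvGroups) with
          | some i => [b0, b1, b2, b3, b4].set i.toNat ([b0, b1, b2, b3, b4].getD i.toNat [] ++ [d])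
          | none => [b0, b1, b2, b3, b4]) = [b0, b1, b2, b3, b4 ++ [d]] from by simp [hgi]]
      rw [ih]
      simp [pvQ, hgi]
    · rw [show (match pvGroupIdx (pvName d) (PySem.List.enumerate pvGroups) with
          | some i => [b0, b1, b2, b3, b4].set i.toNat ([b0, b1, b2, b3, b4].getD i.toNat [] ++ [d])
          | none => [b0, b1, b2, b3, b4]) = [b0, b1, b2, b3, b4] from by simp [hgi]]
      rw [ih]
      simp [pvQ, hgi]

lemma insertBy_cons_of_forall {α : Type} (b : α → α → Bool) (x : α) (l : List α)
    (h : ∀ z ∈ l, b x z = true) : PySem.List.insertBy b x l = x :: l := by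
  cases l with
  | nil => rfl
  | cons z zs => simp [PySem.List.insertBy, h z (by simp)]

lemma pairwise_insertBy {α κ : Type} [LinearOrder κ] (key : α → κ) (x : α) (l : List α)
    (h : l.Pairwise (fun a b => key a ≤ key b)) :
    (PySem.List.insertBy (fun a b => decide (key a < key b)) x l).Pairwise
      (fun a b => key a ≤ key b) := by
  induction l with
  | nil => simp [PySem.List.insertBy]
  | cons y ys ih =>
    rcases List.pairwise_cons.mp h with ⟨hy, hys⟩
    by_cases hb : key x < key y
    · rw [show PySem.List.insertBy (fun a b => decide (key a < key b)) x (y :: ys) = x :: y :: ys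
        by simp [PySem.List.insertBy, hb]]
      refine List.pairwise_cons.mpr ⟨?_, h⟩
      intro z hz
      rcases List.mem_cons.mp hz with rfl | hz
      · exact le_of_lt hb
      · exact le_of_lt (lt_of_lt_of_le hb (hy z hz))
    · rw [show PySem.List.insertBy (fun a b => decide (key a < key b)) x (y :: ys) =
        y :: PySem.List.insertBy (fun a b => decide (key a < key b)) x ys
        by simp [PySem.List.insertBy, hb]]
      refine List.pairwise_cons.mpr ⟨?_, ih hys⟩
      intro z hz
      rcases (PySem.List.mem_insertBy _ x z ys).mp hz with rfl | hz
      · exact not_lt.mp hb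
      · exact hy z hz

lemma filter_insertBy {α κ : Type} [LinearOrder κ] (key : α → κ) (p : α → Bool) (x : α)
    (l : List α) (h : l.Pairwise (fun a b => key a ≤ key b)) :
    (PySem.List.insertBy (fun a b => decide (key a < key b)) x l).filter p =
      if p x then PySem.List.insertBy (fun a b => decide (key a < key b)) x (l.filter p)
      else l.filter p := by
  induction l with
  | nil => by_cases hp : p x <;> simp [PySem.List.insertBy, hp]
  | cons y ys ih =>
    rcases List.pairwise_cons.mp h with ⟨hy, hys⟩
    by_cases hb : key x < key y
    · rw [show PySem.List.insertBy (fun a b => decide (key a < key b)) x (y :: ys) = x :: y :: ys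
        by simp [PySem.List.insertBy, hb]]
      by_cases hp : p x
      · rw [insertBy_cons_of_forall (l := (y :: ys).filter p)]
        · simp [List.filter_cons, hp]
        · intro z hz
          rcases List.mem_cons.mp (List.mem_of_mem_filter hz) with rfl | hz'
          · simpa using hb
          · simpa using lt_of_lt_of_le hb (hy z hz')
      · simp [List.filter_cons, hp]
    · rw [show PySem.List.insertBy (fun a b => decide (key a < key b)) x (y :: ys) =
        y :: PySem.List.insertBy (fun a b => decide (key a < key b)) x ys
        by simp [PySem.List.insertBy, hb]]
      by_cases hp : p x <;> by_cases hpy : p y <;>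
        simp [hp, hpy, ih hys, PySem.List.insertBy, hb]

lemma filter_foldl_insertBy {α κ : Type} [LinearOrder κ] (key : α → κ) (p : α → Bool)
    (xs : List α) (l : List α) (h : l.Pairwise (fun a b => key a ≤ key b)) :
    (xs.foldl (fun acc x => PySem.List.insertBy (fun a b => decide (key a < key b)) x acc) l).filter p =
      (xs.filter p).foldl (fun acc x => PySem.List.insertBy (fun a b => decide (key a < key b)) x acc)
        (l.filter p) := by
  induction xs generalizing l with
  | nil => simp
  | cons x t ih =>
    simp only [List.foldl_cons, List.filter_cons]
    rw [ih _ (pairwise_insertBy key x l h), filter_insertBy key p x l h]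
    by_cases hp : p x <;> simp [hp]

lemma sorted_filter {α κ : Type} [LinearOrder κ] (key : α → κ) (p : α → Bool) (xs : List α) :
    (PySem.List.sorted xs key false).filter p = PySem.List.sorted (xs.filter p) key false := by
  rw [PySem.List.sorted_eq_foldl_insertBy, PySem.List.sorted_eq_foldl_insertBy]
  simpa using filter_foldl_insertBy key p xs [] List.Pairwise.nil

lemma bucket_eq (i : Nat) (data : List (List (String × String))) :
    (PySem.List.sorted data pvName false).filter (pvQ i) =
      PySem.List.sorted (data.filter (pvP i)) pvName false := by
  rw [List.filter_congr (fun d _ => Q_eq_P i d), sorted_filter]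

-- ===== VERDICT (by name: the statement is the Claim_ definition above) =====
theorem dividir_paginador_spec : Claim_equal_dividir_paginador := by
  intro data _dom _pre
  show dividir_paginador data = dividir_paginador_alt data
  unfold dividir_paginador dividir_paginador_alt
  simp only [aFold, bFold, bucket_eq, List.nil_append]
  try simp
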